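-- pv_equiv track=rewrite | github.com/KrzysztofMarek/ProjektowanieOprogramowania | oferty/zarzadzanie_oferta_restauracji.py | waliduj_nazwe
-- ===== SOURCE A (Python) =====
-- import string
--
-- def waliduj_nazwe(nazwa):
--     if len(nazwa) > 30:
--         return False
--     if nazwa[0] not in string.ascii_uppercase:
--         return False
--     for letter in nazwa[1:]:
--         if letter not in string.whitespace and letter not in string.ascii_lowercase and letter not in string.ascii_uppercase and letter != '-':
--             return False
--     return True
-- ===== SOURCE B (Python) =====
-- import re
-- import string
--
-- def waliduj_nazwe(nazwa):
--     if len(nazwa) > 30: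
--         return False
--     if nazwa[0] not in string.ascii_uppercase:
--         return False
--     # regex engine scans the tail in one fullmatch instead of a manual per-char loop;
--     # re.ASCII makes \s match exactly string.whitespace
--     return re.fullmatch(r'[A-Za-z\s-]*', nazwa[1:], re.ASCII) is not None
-- ===== Notes on version B (the rewrite author's own statement) =====
-- stated objective: idiomatic
-- what changed: The hand-written per-character loop with four membership tests is replaced by a single re.fullmatch against the character class [A-Za-z\s-]* (with re.ASCII so \s matches exactly string.whitespace).
import Mathlib
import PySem

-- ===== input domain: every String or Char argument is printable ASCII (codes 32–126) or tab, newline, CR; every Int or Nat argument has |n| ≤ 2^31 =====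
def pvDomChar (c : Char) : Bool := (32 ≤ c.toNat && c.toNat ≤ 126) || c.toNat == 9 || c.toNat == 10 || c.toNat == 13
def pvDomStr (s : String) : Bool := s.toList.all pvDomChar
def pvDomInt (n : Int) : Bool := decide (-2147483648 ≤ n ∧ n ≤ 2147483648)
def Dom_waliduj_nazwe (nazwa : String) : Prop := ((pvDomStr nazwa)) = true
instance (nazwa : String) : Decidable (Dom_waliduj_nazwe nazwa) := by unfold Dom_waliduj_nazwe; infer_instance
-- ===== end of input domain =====

-- B replaces A's per-character loop (four membership tests, early return) by a single
-- regex fullmatch of the tail against [A-Za-z\s-]* (re.ASCII); same values everywhere on Pre_.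

-- ===== PORT A =====
-- string.whitespace = ' \t\n\x0b\x0c\r'
def pvWhitespace : List Char := [' ', '\t', '\n', '\x0b', '\x0c', '\r']
-- string.ascii_uppercase / ascii_lowercase as literal character lists
def pvUppercase : List Char :=
  ['A','B','C','D','E','F','G','H','I','J','K','L','M','N','O','P','Q','R','S','T','U','V','W','X','Y','Z']
def pvLowercase : List Char :=
  ['a','b','c','d','e','f','g','h','i','j','k','l','m','n','o','p','q','r','s','t','u','v','w','x','y','z']

-- the `for letter in nazwa[1:]` loop with its early `return False`
def pvLoopA : List Char → Bool
  | [] => true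
  | c :: rest =>
    if !pvWhitespace.contains c && !pvLowercase.contains c && !pvUppercase.contains c && c != '-' then
      false
    else
      pvLoopA rest

def waliduj_nazwe (nazwa : String) : Bool :=
  let cs := nazwa.toList
  if cs.length > 30 then false
  else
    match PySem.List.pyGet? cs 0 with
    | none => false      -- IndexError in Python (empty string); outside Pre_
    | some c0 =>
      if !pvUppercase.contains c0 then false
      else pvLoopA (PySem.List.slice cs (some 1) none)

-- ===== PORT B =====
-- the regex character class [A-Za-z\s-] under re.ASCII (\s = string.whitespace)
def pvClassB (c : Char) : Bool :=
  ('A' ≤ c && c ≤ 'Z') || ('a' ≤ c && c ≤ 'z') ||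
  c == ' ' || c == '\t' || c == '\n' || c == '\x0b' || c == '\x0c' || c == '\r' || c == '-'

def waliduj_nazwe_alt (nazwa : String) : Bool :=
  let cs := nazwa.toList
  if cs.length > 30 then false
  else
    match PySem.List.pyGet? cs 0 with
    | none => false      -- IndexError in Python (empty string); outside Pre_
    | some c0 =>
      if !pvUppercase.contains c0 then false
      else (PySem.List.slice cs (some 1) none).all pvClassB  -- fullmatch of [A-Za-z\s-]* on the tail

-- ===== PRECONDITION & SPEC =====
-- Pre_ excludes only the empty string, on which both A and B raise IndexError at nazwa[0].
def Pre_waliduj_nazwe (nazwa : String) : Prop := nazwa ≠ ""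
instance (nazwa : String) : Decidable (Pre_waliduj_nazwe nazwa) := by unfold Pre_waliduj_nazwe; infer_instance
def pvWitness_waliduj_nazwe : String := "Pizza Roma"

def Spec_waliduj_nazwe (nazwa : String) (out : Bool) : Prop := out = waliduj_nazwe_alt nazwa
instance (nazwa : String) (out : Bool) : Decidable (Spec_waliduj_nazwe nazwa out) := by unfold Spec_waliduj_nazwe; infer_instance

-- ===== CLAIM (what is proved, stated in full; the proofs are below) =====
def Claim_equal_waliduj_nazwe : Prop := ∀ (nazwa : String), Dom_waliduj_nazwe nazwa → Pre_waliduj_nazwe nazwa → Spec_waliduj_nazwe nazwa (waliduj_nazwe nazwa)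

-- ===== LEMMAS AND PROOFS =====
set_option maxRecDepth 100000 in
theorem pvUpper_contains (c : Char) : pvUppercase.contains c = ('A' ≤ c && c ≤ 'Z') := by
  rw [Bool.eq_iff_iff]
  simp [pvUppercase, Char.le_def, UInt32.le_iff_toNat_le, Char.ext_iff, UInt32.ext_iff]
  omega

set_option maxRecDepth 100000 in
theorem pvLower_contains (c : Char) : pvLowercase.contains c = ('a' ≤ c && c ≤ 'z') := by
  rw [Bool.eq_iff_iff]
  simp [pvLowercase, Char.le_def, UInt32.le_iff_toNat_le, Char.ext_iff, UInt32.ext_iff]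
  omega

theorem pvStep (c : Char) :
    (!pvWhitespace.contains c && !pvLowercase.contains c && !pvUppercase.contains c && c != '-')
      = !pvClassB c := by
  rw [pvUpper_contains, pvLower_contains, Bool.eq_iff_iff]
  simp [pvWhitespace, pvClassB]
  tauto

theorem pvLoopA_eq_all (l : List Char) : pvLoopA l = l.all pvClassB := by
  induction l with
  | nil => rfl
  | cons c rest ih =>
    rw [pvLoopA, List.all_cons, ← ih, pvStep]
    cases pvClassB c <;> simp

-- ===== VERDICT (by name: the statement is the Claim_ definition above) =====
theorem waliduj_nazwe_spec : Claim_equal_waliduj_nazwe := by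
  intro nazwa _ _
  unfold Spec_waliduj_nazwe waliduj_nazwe waliduj_nazwe_alt
  simp only [pvLoopA_eq_all]
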